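-- pv_equiv track=rewrite | github.com/TheDukeVin/AMP | queens/student/four_queens.py | no_collisions_4x4
-- ===== SOURCE A (Python) =====
-- def no_collisions_4x4(board, column, row):
--     """Determines whether a board has Queens which attack the same squares
--         on a 4x4 chess board.
--
--       Args:
--         board (list): A list lists representing the placement of Queens
--         column (int): The current column being considered
--         row (int):  The current row being considered
--
--       Returns:
--         bool: True if there are no collisions, False if there is 1 or more collisions
--     """
--     n = 4
--
--     #Column Check: Not needed because of how we generate queens
--
--     #Row Check: No 2 queens on the same row
--     for j in range(column):
--         if board[row][j] == 1:
--             return False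
--
--     k = 1   # / Diagonal Check
--     while row - k >= 0 and column - k >= 0:
--         if board[row - k][column - k] == 1:
--             return False
--         k += 1
--
--     k = 1  # \ Diagonal Check
--     while row + k < n and column - k >= 0:
--         if board[row + k][column - k] == 1:
--             return False
--         k += 1
--
--     return True
-- ===== SOURCE B (Python) =====
-- def no_collisions_4x4(board, column, row):
--     n = 4
--     for i in range(n):
--         for j in range(column):
--             if board[i][j] == 1 and (i == row or abs(i - row) == column - j):
--                 return False
--     return True
-- ===== Notes on version B (the rewrite author's own statement) =====
-- stated objective: simpler
-- what changed: Instead of walking three attack lines (a row loop plus two diagonal while-loops with an offset counter k), B scans every cell of the 4-row board once and tests it against a single is-attacked predicate (same row, or |i - row| equals the column distance).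
-- outside the precondition, e.g. on no_collisions_4x4([[0], [0], [0]], 1, 0): A returns True, B raises IndexError
import Mathlib
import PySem

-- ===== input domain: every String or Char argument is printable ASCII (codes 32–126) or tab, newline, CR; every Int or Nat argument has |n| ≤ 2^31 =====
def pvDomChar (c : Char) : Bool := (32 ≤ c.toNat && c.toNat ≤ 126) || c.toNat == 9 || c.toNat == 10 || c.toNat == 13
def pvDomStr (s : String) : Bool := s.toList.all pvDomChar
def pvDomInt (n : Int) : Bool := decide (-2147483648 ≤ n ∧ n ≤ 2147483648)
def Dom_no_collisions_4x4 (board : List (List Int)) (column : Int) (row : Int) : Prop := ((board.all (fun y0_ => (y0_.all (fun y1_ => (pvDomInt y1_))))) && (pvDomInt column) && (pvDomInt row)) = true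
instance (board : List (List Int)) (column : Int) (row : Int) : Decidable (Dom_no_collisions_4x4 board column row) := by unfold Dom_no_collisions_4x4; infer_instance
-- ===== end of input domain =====

-- B replaces A's three attack-line scans (row loop + two diagonal while-loops with a counter k)
-- by one scan of all cells of the 4-row board against an is-attacked predicate; objective: simpler.

-- ===== PORT A =====
-- board[r][c]; the getD defaults are never reached inside Pre_
def pvCellA (board : List (List Int)) (r c : Int) : Int :=
  PySem.List.pyGetD (PySem.List.pyGetD board r []) c 0

-- 'for j in range(column): if board[row][j] == 1: return False'
def pvRowCheckA (board : List (List Int)) (row : Int) : List Int → Bool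
  | [] => true
  | j :: js => if pvCellA board row j == 1 then false else pvRowCheckA board row js

-- 'k = 1; while row - k >= 0 and column - k >= 0: …' (/ diagonal; the Nat fuel only
-- totalizes the while-loop: it is ≥ the number of iterations, the loop condition is unchanged)
def pvDiag1A (board : List (List Int)) (row column : Int) : Int → Nat → Bool
  | _, 0 => true
  | k, fuel + 1 =>
    if 0 ≤ row - k ∧ 0 ≤ column - k then
      if pvCellA board (row - k) (column - k) == 1 then false
      else pvDiag1A board row column (k + 1) fuel
    else true

-- 'k = 1; while row + k < n and column - k >= 0: …' (\ diagonal, n = 4; same fuel scheme)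
def pvDiag2A (board : List (List Int)) (row column : Int) : Int → Nat → Bool
  | _, 0 => true
  | k, fuel + 1 =>
    if row + k < 4 ∧ 0 ≤ column - k then
      if pvCellA board (row + k) (column - k) == 1 then false
      else pvDiag2A board row column (k + 1) fuel
    else true

def no_collisions_4x4 (board : List (List Int)) (column : Int) (row : Int) : Bool :=
  pvRowCheckA board row (PySem.List.pyRange 0 column 1)
    && pvDiag1A board row column 1 (min row column).toNat
    && pvDiag2A board row column 1 (min (3 - row) column).toNat

-- ===== PORT B =====
-- nested 'for i in range(4): for j in range(column): if … : return False' as a not-any;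
-- Python's 'abs(i - row) == column - j' is rendered as the two-sided integer equality
def no_collisions_4x4_alt (board : List (List Int)) (column : Int) (row : Int) : Bool :=
  !((PySem.List.pyRange 0 4 1).any fun i =>
      (PySem.List.pyRange 0 column 1).any fun j =>
        (pvCellA board i j == 1)
          && (decide (i = row) || decide (i - row = column - j ∨ row - i = column - j)))

-- ===== PRECONDITION & SPEC =====
-- Pre_ restricts to the function's natural domain: a board with at least 4 rows whose first four
-- rows each hold the columns 0..column-1, with 0 ≤ row < 4 (or the trivial column ≤ 0, where
-- nothing is read). It excludes negative rows, on which A's negative-index wraparound mixes row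
-- (row+4)'s cells into the check — a meaning no 4x4 placement has — and boards with fewer than 4
-- rows or rows shorter than column, on which the unguarded reads of A or B may raise IndexError.
def Pre_no_collisions_4x4 (board : List (List Int)) (column : Int) (row : Int) : Prop :=
  column ≤ 0 ∨
    (4 ≤ board.length ∧ (∀ r ∈ board.take 4, column ≤ (r.length : Int)) ∧ 0 ≤ row ∧ row < 4)
instance (board : List (List Int)) (column : Int) (row : Int) : Decidable (Pre_no_collisions_4x4 board column row) := by unfold Pre_no_collisions_4x4; infer_instance

def pvWitness_no_collisions_4x4 : List (List Int) × Int × Int :=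
  ([[0, 1, 0, 0], [0, 0, 0, 1], [1, 0, 0, 0], [0, 0, 0, 0]], 2, 3)

def Spec_no_collisions_4x4 (board : List (List Int)) (column : Int) (row : Int) (out : Bool) : Prop := out = no_collisions_4x4_alt board column row
instance (board : List (List Int)) (column : Int) (row : Int) (out : Bool) : Decidable (Spec_no_collisions_4x4 board column row out) := by unfold Spec_no_collisions_4x4; infer_instance

-- ===== CLAIM (what is proved, stated in full; the proofs are below) =====
def Claim_equal_no_collisions_4x4 : Prop := ∀ (board : List (List Int)) (column : Int) (row : Int), Dom_no_collisions_4x4 board column row → Pre_no_collisions_4x4 board column row → Spec_no_collisions_4x4 board column row (no_collisions_4x4 board column row)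

-- ===== LEMMAS AND PROOFS =====

-- A's row loop is an 'all' over the scanned columns
theorem rowCheck_eq (board : List (List Int)) (row : Int) (l : List Int) :
    pvRowCheckA board row l = l.all (fun j => !(pvCellA board row j == 1)) := by
  induction l with
  | nil => rfl
  | cons j js ih => by_cases h : pvCellA board row j == 1 <;> simp [pvRowCheckA, h, ih]

-- A's / diagonal while-loop is an 'all' over the offsets k ≤ min row column
theorem diag1_eq (board : List (List Int)) (row column : Int) (fuel : Nat) :
    ∀ k : Int, min row column + 1 - k ≤ (fuel : Int) →
      pvDiag1A board row column k fuel =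
        (PySem.List.pyRange k (min row column + 1) 1).all
          (fun t => !(pvCellA board (row - t) (column - t) == 1)) := by
  induction fuel with
  | zero =>
    intro k h
    rw [PySem.List.pyRange_one_eq_nil (by omega)]
    rfl
  | succ fuel ih =>
    intro k h
    by_cases hc : 0 ≤ row - k ∧ 0 ≤ column - k
    · rw [pvDiag1A, if_pos hc, PySem.List.pyRange_one_cons (by omega)]
      by_cases h1 : pvCellA board (row - k) (column - k) == 1
      · simp [h1]
      · simp only [h1, List.all_cons]
        rw [ih (k + 1) (by omega)]
        simp
    · rw [pvDiag1A, if_neg hc, PySem.List.pyRange_one_eq_nil (by omega)]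
      rfl

-- A's \ diagonal while-loop is an 'all' over the offsets k ≤ min (3 - row) column
theorem diag2_eq (board : List (List Int)) (row column : Int) (fuel : Nat) :
    ∀ k : Int, min (3 - row) column + 1 - k ≤ (fuel : Int) →
      pvDiag2A board row column k fuel =
        (PySem.List.pyRange k (min (3 - row) column + 1) 1).all
          (fun t => !(pvCellA board (row + t) (column - t) == 1)) := by
  induction fuel with
  | zero =>
    intro k h
    rw [PySem.List.pyRange_one_eq_nil (by omega)]
    rfl
  | succ fuel ih =>
    intro k h
    by_cases hc : row + k < 4 ∧ 0 ≤ column - k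
    · rw [pvDiag2A, if_pos hc, PySem.List.pyRange_one_cons (by omega)]
      by_cases h1 : pvCellA board (row + k) (column - k) == 1
      · simp [h1]
      · simp only [h1, List.all_cons]
        rw [ih (k + 1) (by omega)]
        simp
    · rw [pvDiag2A, if_neg hc, PySem.List.pyRange_one_eq_nil (by omega)]
      rfl

-- the totalized ports agree whenever 0 ≤ row < 4 or column ≤ 0 (board shape is irrelevant
-- for the totalized ports; Pre_'s shape clauses only rule out Python's IndexError)
theorem main_lemma (board : List (List Int)) (column row : Int)
    (hrow : (0 ≤ row ∧ row < 4) ∨ column ≤ 0) :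
    no_collisions_4x4 board column row = no_collisions_4x4_alt board column row := by
  unfold no_collisions_4x4 no_collisions_4x4_alt
  rw [rowCheck_eq, diag1_eq board row column _ 1 (by omega), diag2_eq board row column _ 1 (by omega)]
  apply Bool.eq_iff_iff.mpr
  simp only [Bool.and_eq_true, List.all_eq_true, Bool.not_eq_true', Bool.not_eq_true,
    List.any_eq_false, List.any_eq_true, not_exists, not_and,
    PySem.List.mem_pyRange_one, and_imp, Bool.or_eq_false_iff,
    decide_eq_false_iff_not, beq_eq_false_iff_ne, ne_eq, beq_iff_eq, not_or]
  constructor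
  · rintro ⟨⟨h1, h2⟩, h3⟩ i hi0 hi4 j hj0 hjc hcell
    refine ⟨?_, ?_, ?_⟩
    · intro hir
      exact h1 j hj0 hjc (by rwa [hir] at hcell)
    · intro he
      have h := h3 (column - j) (by omega) (by omega)
      rw [show column - (column - j) = j by omega, show row + (column - j) = i by omega] at h
      exact h hcell
    · intro he
      have h := h2 (column - j) (by omega) (by omega)
      rw [show column - (column - j) = j by omega, show row - (column - j) = i by omega] at h
      exact h hcell
  · intro hB
    refine ⟨⟨fun j hj0 hjc hcell => ?_, fun t ht1 htm hcell => ?_⟩, fun t ht1 htm hcell => ?_⟩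
    · rcases hrow with hr | hc
      · exact (hB row hr.1 hr.2 j hj0 hjc hcell).1 rfl
      · omega
    · -- / diagonal offset t: the cell is (row - t, column - t)
      have h := hB (row - t) (by omega) (by omega) (column - t) (by omega) (by omega) hcell
      exact h.2.2 (by omega)
    · -- \\ diagonal offset t: the cell is (row + t, column - t)
      have h := hB (row + t) (by omega) (by omega) (column - t) (by omega) (by omega) hcell
      exact h.2.1 (by omega)

-- ===== VERDICT (by name: the statement is the Claim_ definition above) =====
theorem no_collisions_4x4_spec : Claim_equal_no_collisions_4x4 := by
  intro board column row _ hpre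
  refine main_lemma board column row ?_
  rcases hpre with h | h
  · exact Or.inr h
  · exact Or.inl ⟨h.2.2.1, h.2.2.2⟩
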